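-- pv_equiv track=rewrite | github.com/Suhoi82/colocations | coll_tab_set_nf2.0.py | find_context_words
-- ===== SOURCE A (Python) =====
-- def find_context_words(words_list, keywords, stop_words, window_size=40):
--     context_words = {keyword: [] for keyword in keywords}
--
--     for i, word in enumerate(words_list):
--         if word in keywords:
--             start_index = max(0, i - window_size)
--             end_index = min(len(words_list), i + window_size + 1)
--
--             context = [
--                 w for w in words_list[start_index:end_index]
--                 if (w != word and (w in keywords or (w not in stop_words and w.strip() != '')))
--             ]
--             context_words[word].extend(context)
--
--     return context_words
-- ===== SOURCE B (Python) =====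
-- def find_context_words(words_list, keywords, stop_words, window_size=40):
--     kw = set(keywords)
--     st = set(stop_words)
--     # index built once: the words (with their positions) that can ever appear in a context
--     eligible = [(j, w) for j, w in enumerate(words_list)
--                 if w in kw or (w not in st and w.strip() != '')]
--     occurrences = [(i, w) for i, w in enumerate(words_list) if w in kw]
--     context_words = {keyword: [] for keyword in keywords}
--     for i, word in occurrences:
--         context_words[word] += [w for j, w in eligible
--                                 if i - window_size <= j and j <= i + window_size and w != word]
--     return context_words
-- ===== Notes on version B (the rewrite author's own statement) =====
-- stated objective: faster
-- what changed: B builds, each in one pass with set-based membership, an index of eligible (position, word) pairs and a list of keyword occurrences, then gathers each occurrence's context from that index by position bounds, instead of A's per-occurrence slicing with repeated linear membership scans of the keywords and stop_words lists.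
-- intended difference: For window_size < 0, A's end index i+window_size+1 can go negative and Python's slicing wraps it to the tail of the list, so A returns context words taken from an unrelated tail segment; B returns the empty context (an empty window), which is the intended value. — e.g. on find_context_words(["k", "x", "y", "z"], ["k"], [], -2): A returns [("k", ["y"])], B returns [("k", [])]
import Mathlib
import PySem

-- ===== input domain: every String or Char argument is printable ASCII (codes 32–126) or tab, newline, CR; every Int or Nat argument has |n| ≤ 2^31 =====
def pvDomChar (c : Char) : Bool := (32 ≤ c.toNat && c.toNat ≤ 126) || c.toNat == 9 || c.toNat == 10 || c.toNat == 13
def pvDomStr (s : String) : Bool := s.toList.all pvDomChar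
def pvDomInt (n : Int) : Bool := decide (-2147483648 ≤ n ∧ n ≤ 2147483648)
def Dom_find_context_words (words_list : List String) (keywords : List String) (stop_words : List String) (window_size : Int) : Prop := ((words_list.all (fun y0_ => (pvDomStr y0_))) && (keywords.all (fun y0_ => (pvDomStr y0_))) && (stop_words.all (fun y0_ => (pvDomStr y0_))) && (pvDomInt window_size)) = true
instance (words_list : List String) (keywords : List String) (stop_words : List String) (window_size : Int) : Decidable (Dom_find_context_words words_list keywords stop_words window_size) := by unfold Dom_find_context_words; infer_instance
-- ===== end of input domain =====

-- B replaces the per-occurrence slice + repeated membership scans by a once-built index of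
-- eligible (position, word) pairs and keyword occurrences (sets for membership); objective: faster
-- constant factors on large keyword/stop-word lists. A's return value only is compared.

-- ===== PORT A =====
def find_context_words (words_list : List String) (keywords : List String) (stop_words : List String) (window_size : Int) : List (String × List String) :=
  let context_words : PySem.Dict String (List String) :=
    keywords.foldl (fun d keyword => d.insert keyword []) PySem.Dict.empty
  ((PySem.List.enumerate words_list 0).foldl (fun d p =>
      if keywords.contains p.2 then
        let start_index : Int := max 0 (p.1 - window_size)
        let end_index : Int := min (PySem.List.len words_list) (p.1 + window_size + 1)
        let context := (PySem.List.slice words_list (some start_index) (some end_index)).filter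
          (fun w => w != p.2 && (keywords.contains w || (!stop_words.contains w && (PySem.Str.strip w != ""))))
        d.modify p.2 [] (fun l => l ++ context)
      else d)
    context_words).items

-- ===== PORT B =====
def find_context_words_alt (words_list : List String) (keywords : List String) (stop_words : List String) (window_size : Int) : List (String × List String) :=
  let kw : PySem.Set String := PySem.Set.ofList keywords
  let st : PySem.Set String := PySem.Set.ofList stop_words
  let eligible : List (Int × String) := (PySem.List.enumerate words_list 0).filter
      (fun q => PySem.Set.contains kw q.2 || (!PySem.Set.contains st q.2 && (PySem.Str.strip q.2 != "")))
  let occurrences : List (Int × String) := (PySem.List.enumerate words_list 0).filter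
      (fun q => PySem.Set.contains kw q.2)
  let context_words : PySem.Dict String (List String) :=
    keywords.foldl (fun d keyword => d.insert keyword []) PySem.Dict.empty
  (occurrences.foldl (fun d p =>
      d.modify p.2 [] (fun l => l ++
        (eligible.filter (fun q => decide (p.1 - window_size ≤ q.1) && decide (q.1 ≤ p.1 + window_size) && q.2 != p.2)).map (·.2)))
    context_words).items

-- ===== PRECONDITION & SPEC =====
-- For window_size < 0 A's end index i+window_size+1 can go negative, and Python slicing wraps a
-- negative end to the tail of the list, so A collects context words from an unrelated tail segment;
-- B returns the empty context there (an empty window), which is the intended value.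
def D_find_context_words (words_list : List String) (keywords : List String) (stop_words : List String) (window_size : Int) : Prop :=
  window_size < 0 ∧
  ∃ k < min ((-window_size).toNat - 1) words_list.length,
    words_list.getD k "" ∈ keywords ∧
    ∃ v ∈ (words_list.drop (k + (-window_size).toNat)).take
        (words_list.length + 1 - 2 * (-window_size).toNat),
      v ≠ words_list.getD k "" ∧
      (v ∈ keywords ∨ (v ∉ stop_words ∧ PySem.Str.strip v ≠ ""))
instance (words_list : List String) (keywords : List String) (stop_words : List String) (window_size : Int) : Decidable (D_find_context_words words_list keywords stop_words window_size) := by unfold D_find_context_words; infer_instance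

def Spec_find_context_words (words_list : List String) (keywords : List String) (stop_words : List String) (window_size : Int) (out : List (String × List String)) : Prop := ¬ D_find_context_words words_list keywords stop_words window_size → out = find_context_words_alt words_list keywords stop_words window_size
instance (words_list : List String) (keywords : List String) (stop_words : List String) (window_size : Int) (out : List (String × List String)) : Decidable (Spec_find_context_words words_list keywords stop_words window_size out) := by unfold Spec_find_context_words; infer_instance

def pvDiffWitness_find_context_words : List String × List String × List String × Int :=
  (["k", "x", "y", "z"], ["k"], [], -2)
def pvDiffWitnessOut_find_context_words : (List (String × List String)) × (List (String × List String)) :=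
  ([("k", ["y"])], [("k", [])])

-- ===== CLAIM (what is proved, stated in full; the proofs are below) =====
def Claim_unchanged_find_context_words : Prop := ∀ (words_list : List String) (keywords : List String) (stop_words : List String) (window_size : Int), Dom_find_context_words words_list keywords stop_words window_size → Spec_find_context_words words_list keywords stop_words window_size (find_context_words words_list keywords stop_words window_size)
def Claim_changed_find_context_words : Prop := Dom_find_context_words (pvDiffWitness_find_context_words.1) (pvDiffWitness_find_context_words.2.1) (pvDiffWitness_find_context_words.2.2.1) (pvDiffWitness_find_context_words.2.2.2) ∧ D_find_context_words (pvDiffWitness_find_context_words.1) (pvDiffWitness_find_context_words.2.1) (pvDiffWitness_find_context_words.2.2.1) (pvDiffWitness_find_context_words.2.2.2) ∧ find_context_words (pvDiffWitness_find_context_words.1) (pvDiffWitness_find_context_words.2.1) (pvDiffWitness_find_context_words.2.2.1) (pvDiffWitness_find_context_words.2.2.2) = pvDiffWitnessOut_find_context_words.1 ∧ find_context_words_alt (pvDiffWitness_find_context_words.1) (pvDiffWitness_find_context_words.2.1) (pvDiffWitness_find_context_words.2.2.1) (pvDiffWitness_find_context_words.2.2.2) = pvDiffWitnessOut_find_context_words.2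 ∧ pvDiffWitnessOut_find_context_words.1 ≠ pvDiffWitnessOut_find_context_words.2
def Claim_exact_find_context_words : Prop := ∀ (words_list : List String) (keywords : List String) (stop_words : List String) (window_size : Int), Dom_find_context_words words_list keywords stop_words window_size → D_find_context_words words_list keywords stop_words window_size → find_context_words words_list keywords stop_words window_size ≠ find_context_words_alt words_list keywords stop_words window_size

-- ===== LEMMAS AND PROOFS =====

theorem pv_set_contains (l : List String) (w : String) :
    PySem.Set.contains (PySem.Set.ofList l) w = l.contains w := by
  simp [PySem.Set.contains, List.contains_iff_mem, PySem.Set.mem_ofList]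

theorem pv_enum_shift {α : Type} (xs : List α) (s : Int) :
    PySem.List.enumerate xs (s + 1) = (PySem.List.enumerate xs s).map (fun q => (q.1 + 1, q.2)) := by
  induction xs generalizing s with
  | nil => simp [PySem.List.enumerate]
  | cons x xs ih => simp [PySem.List.enumerate_cons, ih]

theorem pv_L0 {α : Type} (xs : List α) (A B : Nat) :
    ((PySem.List.enumerate xs 0).filter
        (fun q => decide ((A : Int) ≤ q.1) && decide (q.1 < (B : Int)))).map (·.2)
      = List.take (B - A) (List.drop A xs) := by
  induction xs generalizing A B with
  | nil => simp [PySem.List.enumerate]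
  | cons x xs ih =>
    rw [PySem.List.enumerate_cons]
    rw [show (0 : Int) + 1 = 0 + 1 by ring, pv_enum_shift xs 0]
    rw [List.filter_cons, List.filter_map]
    have htail : ((PySem.List.enumerate xs 0).filter
        ((fun q => decide ((A : Int) ≤ q.1) && decide (q.1 < (B : Int))) ∘ (fun q => (q.1 + 1, q.2))))
        = (PySem.List.enumerate xs 0).filter
          (fun q => decide (((A - 1 : Nat) : Int) ≤ q.1) && decide (q.1 < ((B - 1 : Nat) : Int))) := by
      apply List.filter_congr
      intro q hq
      obtain ⟨k, hk, rfl⟩ := (PySem.List.mem_enumerate_iff xs 0 q).1 hq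
      simp only [Function.comp]
      congr 1 <;> rw [Bool.eq_iff_iff] <;> simp <;> omega
    rw [htail]
    have hmm : (List.map (fun q : Int × α => (q.1 + 1, q.2))
        ((PySem.List.enumerate xs 0).filter
          (fun q => decide (((A - 1 : Nat) : Int) ≤ q.1) && decide (q.1 < ((B - 1 : Nat) : Int))))).map (·.2)
        = List.take ((B-1) - (A-1)) (List.drop (A-1) xs) := by
      rw [List.map_map, show ((fun (x : Int × α) => x.2) ∘ (fun q : Int × α => (q.1 + 1, q.2)))
        = (fun (x : Int × α) => x.2) from rfl, ih]
    by_cases hA : (A : Int) ≤ 0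
    · have hA0 : A = 0 := by omega
      subst hA0
      by_cases hB : (0 : Int) < B
      · rw [if_pos (by simp; omega), List.map_cons, hmm]
        have : ∃ B', B = B' + 1 := ⟨B - 1, by omega⟩
        obtain ⟨B', rfl⟩ := this
        simp
      · have hB0 : B = 0 := by omega
        subst hB0
        rw [if_neg (by simp)]
        rw [hmm]
        simp
    · rw [if_neg (by simp; omega), hmm]
      obtain ⟨A', rfl⟩ : ∃ A', A = A' + 1 := ⟨A - 1, by omega⟩
      rw [List.drop_succ_cons]
      congr 1
      omega

theorem pv_L1 {α : Type} (xs : List α) (a b : Int) (ha : 0 ≤ a) (hb : 0 ≤ b) :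
    PySem.List.slice xs (some a) (some b)
      = ((PySem.List.enumerate xs 0).filter
          (fun q => decide (a ≤ q.1) && decide (q.1 < b))).map (·.2) := by
  rw [PySem.List.slice_toNat xs ha hb, ← pv_L0 xs a.toNat b.toNat]
  congr 1
  apply List.filter_congr
  intro q _
  rw [Int.toNat_of_nonneg ha, Int.toNat_of_nonneg hb]

theorem pv_slice_eq_take_drop {α : Type} (xs : List α) (a b : Int)
    (ha : 0 ≤ a) (hb : b < 0) :
    PySem.List.slice xs (some a) (some b)
      = List.take ((if (xs.length : Int) + b < 0 then 0 else ((xs.length : Int) + b).toNat)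
          - min a.toNat xs.length) (List.drop (min a.toNat xs.length) xs) := by
  simp only [PySem.List.slice, PySem.List.clampIdx, if_neg (by omega : ¬ a < 0), if_pos hb]

theorem pv_mem_slice_neg {α : Type} (xs : List α) (a b : Int) (x : α)
    (ha : 0 ≤ a) (hb : b < 0) (hx : x ∈ PySem.List.slice xs (some a) (some b)) :
    ∃ j : Nat, ∃ _ : j < xs.length, x = xs[j] ∧ a ≤ (j : Int) ∧ (j : Int) < (xs.length : Int) + b := by
  rw [pv_slice_eq_take_drop xs a b ha hb] at hx
  rw [List.mem_iff_getElem] at hx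
  obtain ⟨m, hm, hx⟩ := hx
  simp only [List.length_take, List.length_drop] at hm
  rw [List.getElem_take, List.getElem_drop] at hx
  by_cases hc : (xs.length : Int) + b < 0
  · rw [if_pos hc] at hm; omega
  · rw [if_neg hc] at hm
    refine ⟨min a.toNat xs.length + m, by omega, hx.symm, by omega, by omega⟩

theorem pv_getD_init (keywords : List String) (c : String) :
    ((keywords.foldl (fun d keyword => d.insert keyword []) PySem.Dict.empty :
        PySem.Dict String (List String))).getD c [] = [] := by
  have h : ∀ (l : List String) (d : PySem.Dict String (List String)), d.getD c [] = [] →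
      (l.foldl (fun d keyword => d.insert keyword []) d).getD c [] = [] := by
    intro l
    induction l with
    | nil => intro d h; simpa using h
    | cons k l ih =>
      intro d h
      simp only [List.foldl_cons]
      exact ih _ (by rw [PySem.Dict.getD_insert]; split <;> simp [h])
  exact h _ _ (by simp [PySem.Dict.getD_empty])

theorem pv_getD_fold (l : List (Int × String)) (d : PySem.Dict String (List String))
    (F : Int × String → List String) (c : String) :
    (l.foldl (fun d p => d.modify p.2 [] (fun v => v ++ F p)) d).getD c []
      = d.getD c [] ++ (l.filter (fun p => p.2 == c)).flatMap F := by
  induction l generalizing d with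
  | nil => simp
  | cons p l ih =>
    simp only [List.foldl_cons, ih, List.filter_cons]
    rw [PySem.Dict.getD_modify]
    by_cases h : p.2 = c
    · simp [h, List.append_assoc]
    · simp [h, Ne.symm h, beq_iff_eq]

theorem pv_mem_slice_neg' {α : Type} (xs : List α) (a b : Int) (j : Nat)
    (ha : 0 ≤ a) (hb : b < 0) (hj : j < xs.length) (h1 : a ≤ (j : Int))
    (h2 : (j : Int) < (xs.length : Int) + b) :
    xs[j] ∈ PySem.List.slice xs (some a) (some b) := by
  rw [pv_slice_eq_take_drop xs a b ha hb, if_neg (by omega)]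
  rw [List.mem_iff_getElem]
  refine ⟨j - min a.toNat xs.length, ?_, ?_⟩
  · simp only [List.length_take, List.length_drop]; omega
  · rw [List.getElem_take, List.getElem_drop]
    congr 1
    omega

-- membership in the tail segment named by D_find_context_words, by index
theorem pv_mem_take_drop {α : Type} (xs : List α) (A T : Nat) (x : α) :
    x ∈ (xs.drop A).take T ↔ ∃ j : Nat, ∃ _ : j < xs.length, A ≤ j ∧ j < A + T ∧ x = xs[j] := by
  constructor
  · intro hx
    rw [List.mem_iff_getElem] at hx
    obtain ⟨m, hm, hx⟩ := hx
    simp only [List.length_take, List.length_drop] at hm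
    rw [List.getElem_take, List.getElem_drop] at hx
    exact ⟨A + m, by omega, by omega, by omega, hx.symm⟩
  · rintro ⟨j, hj, h1, h2, rfl⟩
    rw [List.mem_iff_getElem]
    refine ⟨j - A, by simp only [List.length_take, List.length_drop]; omega, ?_⟩
    rw [List.getElem_take, List.getElem_drop]
    congr 1
    omega

-- the per-occurrence context lists agree outside D_
theorem pv_ctx_eq (words_list keywords stop_words : List String) (ws : Int) (k : Nat)
    (hk : k < words_list.length) (hkw : keywords.contains words_list[k])
    (hD : ¬ D_find_context_words words_list keywords stop_words ws) :
    (PySem.List.slice words_list (some (max 0 ((k : Int) - ws)))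
        (some (min (PySem.List.len words_list) ((k : Int) + ws + 1)))).filter
      (fun w => w != words_list[k] &&
        (keywords.contains w || (!stop_words.contains w && (PySem.Str.strip w != ""))))
    = (((PySem.List.enumerate words_list 0).filter
          (fun q => keywords.contains q.2 ||
            (!stop_words.contains q.2 && (PySem.Str.strip q.2 != "")))).filter
        (fun q => decide ((k : Int) - ws ≤ q.1) && decide (q.1 ≤ (k : Int) + ws) &&
          q.2 != words_list[k])).map (·.2) := by
  simp only [PySem.List.len_eq]
  rcases (by omega : 0 ≤ ws ∨ ws < 0) with hws | hws
  · -- nonnegative window: both are the same filtered window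
    rw [pv_L1 words_list _ _ (le_max_left 0 _) (by omega)]
    rw [List.filter_map, List.filter_filter, List.filter_filter]
    congr 1
    apply List.filter_congr
    intro q hq
    obtain ⟨j, hj, rfl⟩ := (PySem.List.mem_enumerate_iff words_list 0 q).1 hq
    simp only [Function.comp, zero_add]
    cases hX : (words_list[j] != words_list[k]) <;>
      cases hY : keywords.contains words_list[j] <;>
        cases hZ : (!stop_words.contains words_list[j] && (PySem.Str.strip words_list[j] != "")) <;>
          simp [hX, hY, hZ] <;> rw [Bool.eq_iff_iff] <;> simp <;> omega
  · -- negative window: both sides are empty (outside D_)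
    have hrhs : (((PySem.List.enumerate words_list 0).filter
          (fun q => keywords.contains q.2 ||
            (!stop_words.contains q.2 && (PySem.Str.strip q.2 != "")))).filter
        (fun q => decide ((k : Int) - ws ≤ q.1) && decide (q.1 ≤ (k : Int) + ws) &&
          q.2 != words_list[k])) = [] := by
      rw [List.filter_eq_nil_iff]
      intro q hq
      rw [List.mem_filter] at hq
      obtain ⟨j, hj, rfl⟩ := (PySem.List.mem_enumerate_iff words_list 0 q).1 hq.1
      simp only [zero_add]
      simp
      omega
    rw [hrhs]
    simp only [List.map_nil]
    rw [List.filter_eq_nil_iff]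
    intro x hx
    by_cases he : (k : Int) + ws + 1 < 0
    · rw [max_eq_right (by omega : (0:Int) ≤ (k:Int) - ws),
        min_eq_right (by omega : (k:Int) + ws + 1 ≤ (words_list.length : Int))] at hx
      obtain ⟨j, hj, rfl, hj1, hj2⟩ := pv_mem_slice_neg words_list _ _ x (by omega) he hx
      cases hX : (words_list[j] != words_list[k]) <;>
        cases hE : (keywords.contains words_list[j] ||
            (!stop_words.contains words_list[j] && (PySem.Str.strip words_list[j] != ""))) <;>
          simp [hX, hE]
      exfalso
      apply hD
      refine ⟨hws, k, by omega, ?_, words_list[j], ?_, ?_, ?_⟩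
      · rw [List.getD_eq_getElem _ _ hk]
        simpa using hkw
      · rw [pv_mem_take_drop]
        exact ⟨j, hj, by omega, by omega, rfl⟩
      · rw [List.getD_eq_getElem _ _ hk]
        simpa using hX
      · rw [Bool.or_eq_true] at hE
        rcases hE with h | h
        · left; simpa using h
        · right; simpa using h
    · rw [PySem.List.slice_toNat words_list (le_max_left 0 _) (by omega)] at hx
      rw [show (min ((words_list.length : Int)) ((k:Int)+ws+1)).toNat
          - (max 0 ((k:Int)-ws)).toNat = 0 by omega] at hx
      simp at hx

-- ===== VERDICT (by name: the statement is the Claim_ definition above) =====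
theorem find_context_words_spec : Claim_unchanged_find_context_words := by
  unfold Claim_unchanged_find_context_words
  intro words_list keywords stop_words window_size _hDom
  unfold Spec_find_context_words
  intro hD
  simp only [find_context_words, find_context_words_alt, pv_set_contains]
  rw [PySem.List.foldl_if_eq_foldl_filter]
  congr 1
  apply PySem.List.foldl_congr_mem
  intro acc p hp
  rw [List.mem_filter] at hp
  obtain ⟨hpm, hpk⟩ := hp
  obtain ⟨k, hk, rfl⟩ := (PySem.List.mem_enumerate_iff words_list 0 p).1 hpm
  simp only [zero_add] at hpk ⊢
  rw [pv_ctx_eq words_list keywords stop_words window_size k hk hpk hD]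

theorem find_context_words_changed : Claim_changed_find_context_words := by
  unfold Claim_changed_find_context_words; decide

theorem find_context_words_tight : Claim_exact_find_context_words := by
  unfold Claim_exact_find_context_words
  intro words_list keywords stop_words window_size _hDom hD heq
  obtain ⟨hws, k, hkm, hmemk, v, hvseg, hvne, hvor⟩ := hD
  rw [pv_mem_take_drop] at hvseg
  obtain ⟨j, hj, hj1, hj2, rfl⟩ := hvseg
  have hk : k < words_list.length := by omega
  have he : (k : Int) + window_size + 1 < 0 := by omega
  rw [List.getD_eq_getElem _ _ hk] at hmemk hvne
  simp only [find_context_words, find_context_words_alt, pv_set_contains] at heq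
  rw [PySem.List.foldl_if_eq_foldl_filter] at heq
  have hdict := PySem.Dict.ext heq
  have hget := congrArg (fun d : PySem.Dict String (List String) => d.getD words_list[k] []) hdict
  simp only at hget
  rw [pv_getD_fold, pv_getD_fold, pv_getD_init, List.nil_append, List.nil_append] at hget
  -- the B side collects nothing at all for a negative window
  have hB : ((((PySem.List.enumerate words_list 0).filter
        (fun q => keywords.contains q.2)).filter
          (fun p => p.2 == words_list[k])).flatMap
        (fun p => ((((PySem.List.enumerate words_list 0).filter
            (fun q => keywords.contains q.2 ||
              (!stop_words.contains q.2 && (PySem.Str.strip q.2 != "")))).filter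
          (fun q => decide (p.1 - window_size ≤ q.1) && decide (q.1 ≤ p.1 + window_size) &&
            q.2 != p.2)).map (·.2)))) = [] := by
    rw [List.flatMap_eq_nil_iff]
    intro p _
    have : (((PySem.List.enumerate words_list 0).filter
          (fun q => keywords.contains q.2 ||
            (!stop_words.contains q.2 && (PySem.Str.strip q.2 != "")))).filter
        (fun q => decide (p.1 - window_size ≤ q.1) && decide (q.1 ≤ p.1 + window_size) &&
          q.2 != p.2)) = [] := by
      rw [List.filter_eq_nil_iff]
      intro q _
      simp
      omega
    rw [this, List.map_nil]
  -- the A side contains words_list[j]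
  have hA : words_list[j] ∈ (((PySem.List.enumerate words_list 0).filter
        (fun q => keywords.contains q.2)).filter
          (fun p => p.2 == words_list[k])).flatMap
        (fun p => (PySem.List.slice words_list (some (max 0 (p.1 - window_size)))
            (some (min (PySem.List.len words_list) (p.1 + window_size + 1)))).filter
          (fun w => w != p.2 &&
            (keywords.contains w || (!stop_words.contains w && (PySem.Str.strip w != ""))))) := by
    rw [List.mem_flatMap]
    refine ⟨((0 : Int) + (k : Int), words_list[k]), ?_, ?_⟩
    · rw [List.mem_filter, List.mem_filter]
      refine ⟨⟨(PySem.List.mem_enumerate_iff words_list 0 _).2 ⟨k, hk, rfl⟩, ?_⟩, by simp⟩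
      simpa using hmemk
    · simp only [zero_add, PySem.List.len_eq]
      rw [max_eq_right (by omega : (0:Int) ≤ (k:Int) - window_size),
        min_eq_right (by omega : (k:Int) + window_size + 1 ≤ (words_list.length : Int))]
      rw [List.mem_filter]
      refine ⟨pv_mem_slice_neg' words_list _ _ j (by omega) he hj (by omega) (by omega), ?_⟩
      simp only [Bool.and_eq_true, bne_iff_ne, ne_eq]
      refine ⟨hvne, ?_⟩
      rcases hvor with h | h
      · simp [h]
      · simp [h.1, h.2]
  rw [hget, hB] at hA
  exact (List.not_mem_nil) hA
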